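-- pv_equiv track=rewrite | github.com/pypi-data/pypi-code-37 | duckietown-challenges/duckietown-challenges-4.0.24.tar.gz/src/duckietown_challenges/challenge.py | steps_from_transitions
-- ===== SOURCE A (Python) =====
-- STATE_ERROR = 'ERROR'
--
-- STATE_SUCCESS = 'SUCCESS'
--
-- STATE_FAILED = 'FAILED'
--
-- def steps_from_transitions(transitions):
--     steps = set()
--     for first, condition, second in transitions:
--         if first not in [STATE_ERROR, STATE_FAILED, STATE_SUCCESS]:
--             steps.add(first)
--         if second not in [STATE_ERROR, STATE_FAILED, STATE_SUCCESS]: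
--             steps.add(second)
--
--     return steps
-- ===== SOURCE B (Python) =====
-- STATE_ERROR = 'ERROR'
--
-- STATE_SUCCESS = 'SUCCESS'
--
-- STATE_FAILED = 'FAILED'
--
-- _TERMINAL = frozenset((STATE_ERROR, STATE_FAILED, STATE_SUCCESS))
--
-- def steps_from_transitions(transitions):
--     # Divide and conquer: split the transition list in half, collect each half's
--     # non-terminal endpoints independently, and merge with set union.
--     def collect(ts):
--         if not ts:
--             return set()
--         if len(ts) == 1:
--             first, _, second = ts[0]
--             return {first, second} - _TERMINAL
--         mid = len(ts) // 2
--         return collect(ts[:mid]) | collect(ts[mid:])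
--     return collect(transitions)
-- ===== Notes on version B (the rewrite author's own statement) =====
-- stated objective: alternative
-- what changed: B is a divide-and-conquer: it recursively splits the transition list into halves, computes each half's non-terminal endpoint set (base case: one triple, built as a two-element set minus the terminal set), and merges the halves with set union, instead of A's single left-to-right loop with per-element membership guards.
import Mathlib
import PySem

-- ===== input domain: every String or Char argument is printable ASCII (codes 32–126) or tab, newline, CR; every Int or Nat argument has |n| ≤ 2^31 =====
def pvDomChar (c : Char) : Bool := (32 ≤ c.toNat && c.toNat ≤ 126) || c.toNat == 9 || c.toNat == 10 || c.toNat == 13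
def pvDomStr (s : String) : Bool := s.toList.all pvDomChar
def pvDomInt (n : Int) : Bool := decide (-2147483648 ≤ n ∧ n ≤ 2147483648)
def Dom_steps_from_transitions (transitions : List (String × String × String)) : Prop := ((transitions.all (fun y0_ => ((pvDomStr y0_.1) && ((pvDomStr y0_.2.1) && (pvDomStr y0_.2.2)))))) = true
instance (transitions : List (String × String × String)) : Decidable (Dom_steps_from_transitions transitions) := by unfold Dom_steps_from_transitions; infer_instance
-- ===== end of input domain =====

-- B computes the non-terminal endpoint set by divide and conquer (split the list in
-- halves, collect each half, merge with set union) instead of A's single guarded loop;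
-- an alternative decomposition of the same task, not claimed faster.


-- ===== PORT A =====
def steps_from_transitions (transitions : List (String × String × String)) : List String :=
  transitions.foldl (fun steps t =>
    let steps1 := if (["ERROR", "FAILED", "SUCCESS"] : List String).contains t.1 then steps
                  else PySem.Set.add steps t.1
    if (["ERROR", "FAILED", "SUCCESS"] : List String).contains t.2.2 then steps1
    else PySem.Set.add steps1 t.2.2)
    PySem.Set.empty

-- ===== PORT B =====
def pvTerminal : PySem.Set String := PySem.Set.ofList ["ERROR", "FAILED", "SUCCESS"]

-- 'collect' from Source B; the slices ts[:mid] / ts[mid:] with 0 ≤ mid ≤ len(ts) are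
-- exactly List.take / List.drop.
def pvCollect : List (String × String × String) → List String
  | [] => PySem.Set.empty
  | [t] => PySem.Set.diff (PySem.Set.ofList [t.1, t.2.2]) pvTerminal
  | t1 :: t2 :: rest =>
      PySem.Set.union
        (pvCollect ((t1 :: t2 :: rest).take ((t1 :: t2 :: rest).length / 2)))
        (pvCollect ((t1 :: t2 :: rest).drop ((t1 :: t2 :: rest).length / 2)))
termination_by ts => ts.length
decreasing_by
  all_goals simp [List.length_take, List.length_drop]; omega

def steps_from_transitions_alt (transitions : List (String × String × String)) : List String :=
  pvCollect transitions

-- ===== PRECONDITION & SPEC =====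
def Spec_steps_from_transitions (transitions : List (String × String × String)) (out : List String) : Prop := out = steps_from_transitions_alt transitions
instance (transitions : List (String × String × String)) (out : List String) : Decidable (Spec_steps_from_transitions transitions out) := by unfold Spec_steps_from_transitions; infer_instance

-- ===== CLAIM (what is proved, stated in full; the proofs are below) =====
def Claim_equal_steps_from_transitions : Prop := ∀ (transitions : List (String × String × String)), Dom_steps_from_transitions transitions → Spec_steps_from_transitions transitions (steps_from_transitions transitions)

-- ===== LEMMAS AND PROOFS =====

-- canonical form both ports are reduced to: all endpoints, deduped, minus terminals
def pvCanon (l : List (String × String × String)) : List String :=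
  PySem.Set.diff (PySem.Set.ofList (l.flatMap (fun t => [t.1, t.2.2]))) pvTerminal

-- diff distributes over add
theorem pv_diff_add (s t : List String) (x : String) :
    PySem.Set.diff (PySem.Set.add s x) t =
      (if t.contains x then PySem.Set.diff s t else PySem.Set.add (PySem.Set.diff s t) x) := by
  simp only [PySem.Set.diff, PySem.Set.add_eq_ite]
  by_cases hx : x ∈ t <;> by_cases hs : x ∈ s <;>
    simp [hx, hs, List.filter_append, List.mem_filter]

-- pulling the diff through a fold of adds
theorem pv_diff_foldl (t : List String) (l : List String) (acc : List String) :
    PySem.Set.diff (l.foldl PySem.Set.add acc) t =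
      l.foldl (fun s x => if t.contains x then s else PySem.Set.add s x) (PySem.Set.diff acc t) := by
  induction l generalizing acc with
  | nil => rfl
  | cons x l ih =>
      simp only [List.foldl_cons, ih, pv_diff_add]

theorem pv_foldl_flatMap_pair (g : List String → String → List String)
    (l : List (String × String × String)) (acc : List String) :
    ((l.flatMap (fun t => [t.1, t.2.2])).foldl g acc) =
      l.foldl (fun s t => g (g s t.1) t.2.2) acc := by
  induction l generalizing acc with
  | nil => rfl
  | cons t l ih => simp [List.flatMap_cons, ih]

-- A's loop computes the canonical form
theorem pv_a_canon (ts : List (String × String × String)) :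
    steps_from_transitions ts = pvCanon ts := by
  unfold steps_from_transitions pvCanon pvTerminal
  rw [PySem.Set.ofList_eq_foldl, pv_diff_foldl, pv_foldl_flatMap_pair]
  rfl

-- the canonical form splits over append as a set union
theorem pv_canon_append (x y : List (String × String × String)) :
    pvCanon (x ++ y) = PySem.Set.union (pvCanon x) (pvCanon y) := by
  unfold pvCanon
  show PySem.Set.diff (PySem.Set.ofList ((x ++ y).flatMap _)) _ = _
  rw [List.flatMap_append, PySem.Set.ofList_append]
  simp only [PySem.Set.diff, PySem.Set.union]
  rw [PySem.Set.update_eq_append_filter, PySem.Set.update_eq_append_filter]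
  have hnd : (List.filter (fun z => !pvTerminal.contains z)
      (PySem.Set.ofList (y.flatMap fun t => [t.1, t.2.2]))).Nodup :=
    List.Nodup.filter _ (PySem.Set.nodup_ofList _)
  rw [PySem.Set.ofList_eq_self_of_nodup _ hnd]
  rw [List.filter_append, List.filter_filter, List.filter_filter]
  congr 1
  apply List.filter_congr
  intro z _
  by_cases hT : z ∈ pvTerminal <;>
    by_cases hx : z ∈ PySem.Set.ofList (x.flatMap fun t => [t.1, t.2.2]) <;>
      simp [PySem.Set.contains, List.mem_filter, hT, hx]

-- B's divide and conquer computes the canonical form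
theorem pv_collect_canon (ts : List (String × String × String)) :
    pvCollect ts = pvCanon ts := by
  induction ts using pvCollect.induct with
  | case1 => simp [pvCollect, pvCanon, PySem.Set.diff]
  | case2 t => simp [pvCollect, pvCanon]
  | case3 t1 t2 rest ih1 ih2 =>
      rw [pvCollect, ih1, ih2, ← pv_canon_append, List.take_append_drop]

-- ===== VERDICT (by name: the statement is the Claim_ definition above) =====
theorem steps_from_transitions_spec : Claim_equal_steps_from_transitions := by
  intro transitions _
  unfold Spec_steps_from_transitions steps_from_transitions_alt
  rw [pv_collect_canon, pv_a_canon]
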